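-- pv_equiv track=rewrite | github.com/patrickcantillon88/ptcc_lite_19oct | backend/agents/teacher-tools/behavior-manager/agent.py | _create_influence_clusters
-- ===== SOURCE A (Python) =====
-- from typing import Dict, List, Optional, Any, Tuple
--
-- def _create_influence_clusters(behavior_profiles: Dict, positive_students: List) -> Dict[str, List[int]]:
--     """Create seating plan with positive influence clusters"""
--     all_students = list(behavior_profiles.keys())
--     positive_ids = [sid for sid, _ in positive_students]
--
--     # Create clusters around positive students
--     cluster_centers = positive_ids[:2]  # Use top 2 positive students as centers
--
--     row1 = cluster_centers[:1] + [sid for sid in all_students if sid not in cluster_centers][:7]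
--     row2 = cluster_centers[1:] + [sid for sid in all_students if sid not in cluster_centers and sid not in row1][:7]
--
--     return {
--         "front_row": row1,
--         "back_row": row2
--     }
-- ===== SOURCE B (Python) =====
-- def _create_influence_clusters(behavior_profiles, positive_students):
--     """Create seating plan with positive influence clusters"""
--     centers = [sid for sid, _ in positive_students[:2]]
--     row1 = centers[:1]
--     row2 = centers[1:]
--     front_filled = 0
--     back_filled = 0
--     for sid in behavior_profiles:
--         if sid in centers:
--             continue
--         if front_filled < 7:
--             row1.append(sid)
--             front_filled += 1
--         elif back_filled < 7:
--             row2.append(sid)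
--             back_filled += 1
--         else:
--             break
--     return {"front_row": row1, "back_row": row2}
-- ===== Notes on version B (the rewrite author's own statement) =====
-- stated objective: faster
-- what changed: B replaces A's two staged membership-filtered scans of all students (the second with a nested not-in-row1 test) by one single pass with fill counters that appends each non-center student to the front row until it holds 7, then to the back row until it holds 7, then breaks out of the loop early.
import Mathlib
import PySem

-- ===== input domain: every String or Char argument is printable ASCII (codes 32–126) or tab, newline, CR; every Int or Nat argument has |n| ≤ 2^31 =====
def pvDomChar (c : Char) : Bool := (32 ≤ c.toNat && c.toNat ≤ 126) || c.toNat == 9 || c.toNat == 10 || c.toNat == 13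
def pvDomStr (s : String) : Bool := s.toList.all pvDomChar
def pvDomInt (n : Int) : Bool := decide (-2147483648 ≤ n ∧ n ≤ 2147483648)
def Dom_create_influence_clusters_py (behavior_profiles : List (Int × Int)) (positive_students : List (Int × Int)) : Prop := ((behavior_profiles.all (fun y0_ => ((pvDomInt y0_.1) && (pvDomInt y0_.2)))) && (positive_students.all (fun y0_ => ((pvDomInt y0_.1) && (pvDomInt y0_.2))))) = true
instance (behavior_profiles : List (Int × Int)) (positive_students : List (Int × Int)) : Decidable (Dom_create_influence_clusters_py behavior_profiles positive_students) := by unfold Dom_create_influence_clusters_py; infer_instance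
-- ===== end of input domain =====

-- B replaces A's two staged filtered scans by one single pass with fill counters and an early
-- break, appending each non-center student to the front row until 7, then the back row until 7.

-- ===== PORT A =====
def create_influence_clusters_py (behavior_profiles : List (Int × Int)) (positive_students : List (Int × Int)) : List (String × List Int) :=
  let all_students : List Int := PySem.List.dedup (behavior_profiles.map Prod.fst)  -- list(behavior_profiles.keys())
  let positive_ids : List Int := positive_students.map Prod.fst
  let cluster_centers : List Int := positive_ids.take 2
  let row1 : List Int := cluster_centers.take 1 ++
    (all_students.filter (fun sid => !(cluster_centers.contains sid))).take 7
  let row2 : List Int := cluster_centers.drop 1 ++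
    (all_students.filter (fun sid => !(cluster_centers.contains sid) && !(row1.contains sid))).take 7
  [("front_row", row1), ("back_row", row2)]

-- ===== PORT B =====
-- the for-loop with 'continue'/'break': structural recursion over the student list carrying
-- (row1, row2, front_filled, back_filled)
def cicAltLoop (centers : List Int) : List Int → List Int → List Int → Nat → Nat → (List Int × List Int)
  | [], r1, r2, _, _ => (r1, r2)
  | sid :: rest, r1, r2, f, b =>
    if centers.contains sid then cicAltLoop centers rest r1 r2 f b
    else if f < 7 then cicAltLoop centers rest (r1 ++ [sid]) r2 (f + 1) b
    else if b < 7 then cicAltLoop centers rest r1 (r2 ++ [sid]) f (b + 1)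
    else (r1, r2)  -- break

def create_influence_clusters_py_alt (behavior_profiles : List (Int × Int)) (positive_students : List (Int × Int)) : List (String × List Int) :=
  let centers : List Int := (positive_students.take 2).map Prod.fst
  let rows := cicAltLoop centers (PySem.List.dedup (behavior_profiles.map Prod.fst))
    (centers.take 1) (centers.drop 1) 0 0
  [("front_row", rows.1), ("back_row", rows.2)]

-- ===== PRECONDITION & SPEC =====
def Spec_create_influence_clusters_py (behavior_profiles : List (Int × Int)) (positive_students : List (Int × Int)) (out : List (String × List Int)) : Prop := out = create_influence_clusters_py_alt behavior_profiles positive_students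
instance (behavior_profiles : List (Int × Int)) (positive_students : List (Int × Int)) (out : List (String × List Int)) : Decidable (Spec_create_influence_clusters_py behavior_profiles positive_students out) := by unfold Spec_create_influence_clusters_py; infer_instance

-- ===== CLAIM (what is proved, stated in full; the proofs are below) =====
def Claim_equal_create_influence_clusters_py : Prop := ∀ (behavior_profiles : List (Int × Int)) (positive_students : List (Int × Int)), Dom_create_influence_clusters_py behavior_profiles positive_students → Spec_create_influence_clusters_py behavior_profiles positive_students (create_influence_clusters_py behavior_profiles positive_students)

-- ===== LEMMAS AND PROOFS =====

-- The loop's closed form: it appends the first 7-f eligible students to r1 and the next 7-b to r2.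
theorem cicAltLoop_eq (centers : List Int) (l r1 r2 : List Int) (f b : Nat)
    (hf : f ≤ 7) (hb : b ≤ 7) :
    cicAltLoop centers l r1 r2 f b =
      (r1 ++ (l.filter (fun sid => !(centers.contains sid))).take (7 - f),
       r2 ++ (((l.filter (fun sid => !(centers.contains sid))).drop (7 - f)).take (7 - b))) := by
  induction l generalizing r1 r2 f b with
  | nil => simp [cicAltLoop]
  | cons sid rest ih =>
    by_cases hc : sid ∈ centers
    · simp [cicAltLoop, hc, ih r1 r2 f b hf hb]
    · by_cases hf7 : f < 7
      · have h1 : 7 - f = (7 - (f + 1)) + 1 := by omega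
        simp only [cicAltLoop, if_pos hf7,
          ih (r1 ++ [sid]) r2 (f + 1) b (by omega) hb]
        simp [hc, h1]
      · have hfe : f = 7 := by omega
        by_cases hb7 : b < 7
        · have h2 : 7 - b = (7 - (b + 1)) + 1 := by omega
          simp only [cicAltLoop, if_neg hf7, if_pos hb7,
            ih r1 (r2 ++ [sid]) f (b + 1) hf (by omega)]
          simp [hc, hfe, h2]
        · have hbe : b = 7 := by omega
          simp [cicAltLoop, hc, hfe, hbe]

-- On a duplicate-free list, filtering out the first n elements is dropping them.
theorem filter_not_mem_take {α : Type} [DecidableEq α] (l : List α) (h : l.Nodup) (n : Nat) :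
    l.filter (fun s => !((l.take n).contains s)) = l.drop n := by
  induction l generalizing n with
  | nil => simp
  | cons x t ih =>
    rw [List.nodup_cons] at h
    obtain ⟨hx, ht⟩ := h
    cases n with
    | zero => simp
    | succ n =>
      have hstep : List.filter (fun s => !((x :: t.take n).contains s)) t
          = List.filter (fun s => !((t.take n).contains s)) t :=
        List.filter_congr (fun y hy => by
          have : y ≠ x := fun e => hx (e ▸ hy)
          simp [this])
      rw [List.take_succ_cons, List.drop_succ_cons, ← ih ht n, ← hstep]
      simp

-- A's back-row scan (filter with the nested not-in-row1 test, then take 7) = drop 7 then take 7.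
theorem row2_eq (ks c : List Int) (hk : ks.Nodup) :
    (ks.filter (fun sid => !(c.contains sid) &&
        !((c.take 1 ++ (ks.filter (fun sid => !(c.contains sid))).take 7).contains sid))).take 7
      = ((ks.filter (fun sid => !(c.contains sid))).drop 7).take 7 := by
  set e : List Int := ks.filter (fun sid => !(c.contains sid)) with he
  set r1 : List Int := c.take 1 ++ e.take 7 with hr1
  have hnod : e.Nodup := hk.filter _
  have h1 : ks.filter (fun sid => !(c.contains sid) && !(r1.contains sid))
      = e.filter (fun sid => !(r1.contains sid)) := by
    rw [he, List.filter_filter]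
    exact List.filter_congr (fun y _ => Bool.and_comm _ _)
  have h2 : e.filter (fun sid => !(r1.contains sid))
      = e.filter (fun sid => !((e.take 7).contains sid)) := by
    apply List.filter_congr
    intro y hy
    have hyc : ¬ y ∈ c := by
      have := List.of_mem_filter hy
      simpa using this
    have hyc1 : ¬ y ∈ c.take 1 := fun hm => hyc (List.mem_of_mem_take hm)
    simp [hr1, hyc1]
  rw [h1, h2, filter_not_mem_take e hnod 7]

theorem create_influence_clusters_core (behavior_profiles : List (Int × Int)) (positive_students : List (Int × Int)) :
    create_influence_clusters_py behavior_profiles positive_students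
      = create_influence_clusters_py_alt behavior_profiles positive_students := by
  simp only [create_influence_clusters_py, create_influence_clusters_py_alt]
  have hcen : (positive_students.take 2).map Prod.fst = (positive_students.map Prod.fst).take 2 :=
    List.map_take ..
  rw [hcen, cicAltLoop_eq _ _ _ _ 0 0 (by omega) (by omega),
    row2_eq (PySem.List.dedup (behavior_profiles.map Prod.fst))
      ((positive_students.map Prod.fst).take 2) (PySem.List.nodup_dedup _)]

-- ===== VERDICT (by name: the statement is the Claim_ definition above) =====
theorem create_influence_clusters_py_spec : Claim_equal_create_influence_clusters_py := by
  intro bp ps _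
  exact create_influence_clusters_core bp ps
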